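-- pv_equiv track=rewrite | github.com/CarAndAsh/CheckIO | py_checkio_solutions/Codeship/rolling.py | rolling_dice
-- ===== SOURCE A (Python) =====
-- def rolling_dice(moves: str) -> int:
--     dice = [[1, 3, 6, 4], [1, 5, 6, 2]]
--     zero_moves = ('SN', 'NS', 'WE', 'EW', 'NNNN', 'SSSS', 'WWWW', 'EEEE')
--     while any(map(lambda zero_move: zero_move in moves, zero_moves)):
--         for zero_move in zero_moves:
--             moves = moves.replace(zero_move, '')
--     for side in moves:
--         if side == "N":
--             dice[1].insert(0, dice[1].pop())
--             dice[0][0], dice[0][2] = dice[1][0], dice[1][2]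
--         elif side == "S":
--             dice[1].append(dice[1].pop(0))
--             dice[0][0], dice[0][2] = dice[1][0], dice[1][2]
--         elif side == "E":
--             dice[0].insert(0, dice[0].pop())
--             dice[1][0], dice[1][2] = dice[0][0], dice[0][2]
--         elif side == "W":
--             dice[0].append(dice[0].pop(0))
--             dice[1][0], dice[1][2] = dice[0][0], dice[0][2]
--     return dice[0][0]
-- ===== SOURCE B (Python) =====
-- def rolling_dice(moves: str) -> int:
--     # Direct one-pass simulation: track all six faces; each move is a fixed permutation of them.
--     t, b, n, s, e, w = 1, 6, 5, 2, 3, 4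
--     for c in moves:
--         if c == "N":
--             t, b, n, s = s, n, t, b
--         elif c == "S":
--             t, b, n, s = n, s, b, t
--         elif c == "E":
--             t, b, e, w = w, e, t, b
--         elif c == "W":
--             t, b, e, w = e, w, b, t
--     return t
-- ===== Notes on version B (the rewrite author's own statement) =====
-- stated objective: simpler
-- what changed: B drops A's repeated substring-cancellation passes (while any zero-move occurs, replace it) and the two mutable 4-element rings, and instead simulates every move directly on six scalar face variables in a single pass.
import Mathlib
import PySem

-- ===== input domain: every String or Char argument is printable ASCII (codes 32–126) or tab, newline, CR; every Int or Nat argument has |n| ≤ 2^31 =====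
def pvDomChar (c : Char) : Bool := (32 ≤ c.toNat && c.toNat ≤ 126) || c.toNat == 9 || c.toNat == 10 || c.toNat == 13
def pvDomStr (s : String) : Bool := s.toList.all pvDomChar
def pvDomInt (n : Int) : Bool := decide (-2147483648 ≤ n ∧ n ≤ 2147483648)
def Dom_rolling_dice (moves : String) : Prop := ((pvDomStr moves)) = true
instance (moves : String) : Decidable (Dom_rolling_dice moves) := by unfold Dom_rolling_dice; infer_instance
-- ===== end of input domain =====

-- B drops A's repeated cancellation/replace passes and its two mutable 4-element rings,
-- simulating every move directly on six scalar face variables in one pass (objective: simpler).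

-- ===== PORT A =====
-- the tuple of cancelling move substrings A repeatedly deletes
def pvZeroMoves : List (List Char) :=
  [['S','N'], ['N','S'], ['W','E'], ['E','W'],
   ['N','N','N','N'], ['S','S','S','S'], ['W','W','W','W'], ['E','E','E','E']]

-- one iteration of A's for-loop body; the dice lists always have 4 elements, so the
-- 'none' fallbacks of pop? (where Python would raise on an empty list) are unreachable
def pvStepA (d : List Int × List Int) (side : Char) : List Int × List Int :=
  if side = 'N' then
    match PySem.List.pop? d.2 with
    | some (v, rest) =>
        let d1 := PySem.List.insert rest 0 v
        ((d.1.set 0 (PySem.List.pyGetD d1 0 0)).set 2 (PySem.List.pyGetD d1 2 0), d1)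
    | none => d
  else if side = 'S' then
    match PySem.List.pop? d.2 0 with
    | some (v, rest) =>
        let d1 := rest ++ [v]
        ((d.1.set 0 (PySem.List.pyGetD d1 0 0)).set 2 (PySem.List.pyGetD d1 2 0), d1)
    | none => d
  else if side = 'E' then
    match PySem.List.pop? d.1 with
    | some (v, rest) =>
        let d0 := PySem.List.insert rest 0 v
        (d0, (d.2.set 0 (PySem.List.pyGetD d0 0 0)).set 2 (PySem.List.pyGetD d0 2 0))
    | none => d
  else if side = 'W' then
    match PySem.List.pop? d.1 0 with
    | some (v, rest) =>
        let d0 := rest ++ [v]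
        (d0, (d.2.set 0 (PySem.List.pyGetD d0 0 0)).set 2 (PySem.List.pyGetD d0 2 0))
    | none => d
  else d

-- A's while-loop: keep applying all eight replaces while any zero move occurs.
-- Every productive iteration deletes at least two characters, so length+1 rounds of
-- fuel always suffice; the fuel-0 branch is unreachable and only makes the loop total.
def pvReduce (fuel : Nat) (cs : List Char) : List Char :=
  match fuel with
  | 0 => cs
  | fuel + 1 =>
      if pvZeroMoves.any (fun zm => PySem.Chars.isIn zm cs) then
        pvReduce fuel (pvZeroMoves.foldl (fun acc zm => PySem.Chars.replace acc zm []) cs)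
      else cs

def rolling_dice (moves : String) : Int :=
  let cs := pvReduce (moves.toList.length + 1) moves.toList
  let d := cs.foldl pvStepA ([1, 3, 6, 4], [1, 5, 6, 2])
  PySem.List.pyGetD d.1 0 0

-- ===== PORT B =====
-- state: (top, bottom, north, south, east, west)
def pvStepB (st : Int × Int × Int × Int × Int × Int) (c : Char) :
    Int × Int × Int × Int × Int × Int :=
  match st with
  | (t, b, n, s, e, w) =>
    if c = 'N' then (s, n, t, b, e, w)
    else if c = 'S' then (n, s, b, t, e, w)
    else if c = 'E' then (w, e, n, s, t, b)
    else if c = 'W' then (e, w, n, s, b, t)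
    else (t, b, n, s, e, w)

def rolling_dice_alt (moves : String) : Int :=
  (moves.toList.foldl pvStepB (1, 6, 5, 2, 3, 4)).1

-- ===== PRECONDITION & SPEC =====
def Spec_rolling_dice (moves : String) (out : Int) : Prop := out = rolling_dice_alt moves
instance (moves : String) (out : Int) : Decidable (Spec_rolling_dice moves out) := by unfold Spec_rolling_dice; infer_instance

-- ===== CLAIM (what is proved, stated in full; the proofs are below) =====
def Claim_equal_rolling_dice : Prop := ∀ (moves : String), Dom_rolling_dice moves → Spec_rolling_dice moves (rolling_dice moves)

-- ===== LEMMAS AND PROOFS =====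

-- the two dice rings of A, expressed from B's six-face state
def pvShape (st : Int × Int × Int × Int × Int × Int) : List Int × List Int :=
  match st with
  | (t, b, n, s, e, w) => ([t, e, b, w], [t, n, b, s])

theorem pvStepA_shape (st : Int × Int × Int × Int × Int × Int) (c : Char) :
    pvStepA (pvShape st) c = pvShape (pvStepB st c) := by
  obtain ⟨t, b, n, s, e, w⟩ := st
  by_cases h1 : c = 'N' <;> by_cases h2 : c = 'S' <;> by_cases h3 : c = 'E' <;> by_cases h4 : c = 'W' <;>
    simp [pvStepA, pvStepB, pvShape, PySem.List.pop?, PySem.List.insert_zero, PySem.List.pyGetD,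
      PySem.List.pyIdx?, h1, h2, h3, h4]

theorem pvFoldA_shape (cs : List Char) (st : Int × Int × Int × Int × Int × Int) :
    cs.foldl pvStepA (pvShape st) = pvShape (cs.foldl pvStepB st) := by
  induction cs generalizing st with
  | nil => rfl
  | cons c cs ih => simp [List.foldl, pvStepA_shape, ih]

theorem pvZero_identity (zm : List Char) (hzm : zm ∈ pvZeroMoves)
    (st : Int × Int × Int × Int × Int × Int) : zm.foldl pvStepB st = st := by
  obtain ⟨t, b, n, s, e, w⟩ := st
  simp only [pvZeroMoves, List.mem_cons, List.not_mem_nil, or_false] at hzm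
  rcases hzm with h | h | h | h | h | h | h | h <;> subst h <;> rfl

theorem pvGo_fold (old : List Char) (hop : old ≠ [])
    (hid : ∀ st, old.foldl pvStepB st = st)
    (fuel : Nat) (l acc : List Char) (hf : l.length ≤ fuel)
    (st : Int × Int × Int × Int × Int × Int) :
    (PySem.Chars.replace.go old [] fuel l acc).foldl pvStepB st
      = (acc.reverse ++ l).foldl pvStepB st := by
  induction fuel generalizing l acc st with
  | zero =>
      have : l = [] := List.eq_nil_of_length_eq_zero (Nat.le_zero.mp hf)
      subst this
      simp [PySem.Chars.replace.go]
  | succ fuel ih =>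
      cases l with
      | nil => simp [PySem.Chars.replace.go]
      | cons c t =>
          rw [PySem.Chars.replace.go]
          by_cases hp : old.isPrefixOf (c :: t)
          · simp only [hp, if_true, List.reverse_nil, List.nil_append]
            obtain ⟨r, hr⟩ := List.isPrefixOf_iff_prefix.mp hp
            have hdropr : List.drop old.length (c :: t) = r := by
              rw [← hr, List.drop_left]
            have hol : 1 ≤ old.length := by
              cases old with
              | nil => exact absurd rfl hop
              | cons _ _ => simp
            have hrlen : r.length ≤ fuel := by
              have := congrArg List.length hr
              simp at this hf
              omega
            rw [hdropr, ih r acc hrlen st, ← hr]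
            simp [List.foldl_append, hid]
          · simp only [hp, Bool.false_eq_true, if_false]
            have ht : t.length ≤ fuel := by simp at hf; omega
            rw [ih t (c :: acc) ht st]
            simp [List.foldl_append]

theorem pvReplace_fold (l old : List Char) (hop : old ≠ [])
    (hid : ∀ st, old.foldl pvStepB st = st)
    (st : Int × Int × Int × Int × Int × Int) :
    (PySem.Chars.replace l old []).foldl pvStepB st = l.foldl pvStepB st := by
  rw [PySem.Chars.replace, if_neg (by simp [hop])]
  rw [pvGo_fold old hop hid l.length l [] (le_refl _) st]
  simp

theorem pvReplaceAll_fold (zms : List (List Char))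
    (h : ∀ zm ∈ zms, zm ≠ [] ∧ ∀ st, zm.foldl pvStepB st = st)
    (cs : List Char) (st : Int × Int × Int × Int × Int × Int) :
    (zms.foldl (fun acc zm => PySem.Chars.replace acc zm []) cs).foldl pvStepB st
      = cs.foldl pvStepB st := by
  induction zms generalizing cs with
  | nil => rfl
  | cons zm zms ih =>
      have hz := h zm (by simp)
      rw [List.foldl_cons, ih (fun z hzz => h z (by simp [hzz])),
        pvReplace_fold cs zm hz.1 hz.2 st]

theorem pvReduce_fold (fuel : Nat) (cs : List Char)
    (st : Int × Int × Int × Int × Int × Int) :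
    (pvReduce fuel cs).foldl pvStepB st = cs.foldl pvStepB st := by
  induction fuel generalizing cs with
  | zero => rfl
  | succ fuel ih =>
      rw [pvReduce]
      split
      · rw [ih, pvReplaceAll_fold]
        intro zm hzm
        refine ⟨?_, pvZero_identity zm hzm⟩
        simp only [pvZeroMoves, List.mem_cons, List.not_mem_nil, or_false] at hzm
        rcases hzm with h | h | h | h | h | h | h | h <;> subst h <;> simp
      · rfl

-- ===== VERDICT (by name: the statement is the Claim_ definition above) =====
theorem rolling_dice_spec : Claim_equal_rolling_dice := by
  intro moves _
  unfold Spec_rolling_dice rolling_dice rolling_dice_alt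
  show PySem.List.pyGetD ((pvReduce (moves.toList.length + 1) moves.toList).foldl pvStepA
      (([1, 3, 6, 4], [1, 5, 6, 2]) : List Int × List Int)).1 0 0
    = (moves.toList.foldl pvStepB (1, 6, 5, 2, 3, 4)).1
  have hinit : (([1, 3, 6, 4], [1, 5, 6, 2]) : List Int × List Int)
      = pvShape (1, 6, 5, 2, 3, 4) := rfl
  rw [hinit, pvFoldA_shape, pvReduce_fold]
  obtain ⟨t, b, n, s, e, w⟩ := moves.toList.foldl pvStepB (1, 6, 5, 2, 3, 4)
  simp [pvShape, PySem.List.pyGetD]
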